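-- pv_equiv track=rewrite | github.com/PROGRAMMINinGPYTHON/minilogia | logia/L20/ile.py | ile
-- ===== SOURCE A (Python) =====
-- def ile(n):
--     v = 2
--     okr = 1
--     par = 3
--
--     bok = 0
--     while True:
--
--         for i in range(1, 7):
--             bok += 1
--             if okr % 2 == 0 and i == 1:
--                 npar = -10
--             else:
--                 npar = -1
--
--             if bok % 2 == 1:
--                 v += npar
--             else:
--                 v += par
--
--             if bok == n:
--                 return v
--         okr += 1
-- ===== SOURCE B (Python) =====
-- def ile(n):
--     # closed form: v = 2 + sum of per-step increments over steps 1..n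
--     return 2 + 4 * (n // 2) - n - 9 * ((n + 5) // 12)
-- ===== Notes on version B (the rewrite author's own statement) =====
-- stated objective: faster
-- what changed: Replaced A's one-step-at-a-time accumulation loop with a closed-form arithmetic expression (complete-cycle sum plus remainder); Pre_ excludes nonpositive n, where A loops forever.
-- outside the precondition, e.g. on ile(0): A does not finish within the time limit, B returns 2
import Mathlib
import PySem

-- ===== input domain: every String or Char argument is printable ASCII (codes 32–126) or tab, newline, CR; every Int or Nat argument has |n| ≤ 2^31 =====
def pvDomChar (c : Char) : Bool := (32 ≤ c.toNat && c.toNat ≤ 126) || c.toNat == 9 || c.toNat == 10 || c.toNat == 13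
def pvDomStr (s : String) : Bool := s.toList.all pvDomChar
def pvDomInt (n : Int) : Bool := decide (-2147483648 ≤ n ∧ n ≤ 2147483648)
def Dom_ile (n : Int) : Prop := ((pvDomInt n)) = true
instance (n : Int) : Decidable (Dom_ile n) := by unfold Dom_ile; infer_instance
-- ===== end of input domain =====

-- B replaces A's step-by-step loop with a closed-form sum over the periodic step pattern; Pre_ excludes nonpositive n, on which A loops forever.

-- ===== PORT A =====
-- A's 'while True' with the inner 'for i in range(1, 7)': one recursive step per
-- iteration of the inner loop body; i and okr are carried as state, and when i
-- reaches 6 the outer loop advances (okr += 1, i restarts at 1). The loop only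
-- terminates via 'return v' when bok == n, so the recursion is fueled by n.toNat
-- (for n ≥ 1 the return fires exactly when fuel runs out).
def ileGo : Nat → Int → Int → Int → Int → Int → Int
  | 0, _, _, _, v, _ => v
  | fuel + 1, okr, i, bok, v, n =>
    let bok' := bok + 1
    let npar : Int := if PySem.Int.mod okr 2 = 0 ∧ i = 1 then -10 else -1
    let v' := if PySem.Int.mod bok' 2 = 1 then v + npar else v + 3
    if bok' = n then v'
    else if i = 6 then ileGo fuel (okr + 1) 1 bok' v' n
    else ileGo fuel okr (i + 1) bok' v' n

def ile (n : Int) : Int := ileGo n.toNat 1 1 0 2 n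

-- ===== PORT B =====
def ile_alt (n : Int) : Int :=
  2 + 4 * PySem.Int.floordiv n 2 - n - 9 * PySem.Int.floordiv (n + 5) 12

-- ===== PRECONDITION & SPEC =====
-- A's loop returns only when its counter hits n, so for n ≤ 0 A never returns.
def Pre_ile (n : Int) : Prop := 1 ≤ n
instance (n : Int) : Decidable (Pre_ile n) := by unfold Pre_ile; infer_instance
def pvWitness_ile : Int := 7

def Spec_ile (n : Int) (out : Int) : Prop := out = ile_alt n
instance (n : Int) (out : Int) : Decidable (Spec_ile n out) := by unfold Spec_ile; infer_instance

-- ===== CLAIM (what is proved, stated in full; the proofs are below) =====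
def Claim_equal_ile : Prop := ∀ (n : Int), Dom_ile n → Pre_ile n → Spec_ile n (ile n)

-- ===== LEMMAS AND PROOFS =====

-- the closed-form value of v after step b (b ≥ 0), stated with ediv
def ileV (b : Int) : Int := 2 + 4 * (b / 2) - b - 9 * ((b + 5) / 12)

lemma ileGo_eq (fuel : Nat) : ∀ (okr i bok v n : Int),
    n = bok + (fuel : Int) → 1 ≤ i → i ≤ 6 → bok = 6 * (okr - 1) + (i - 1) →
    1 ≤ fuel → v = ileV bok → 0 ≤ bok →
    ileGo fuel okr i bok v n = ileV n := by
  induction fuel with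
  | zero => intro _ _ _ _ _ _ _ _ _ h _ _; omega
  | succ fuel ih =>
    intro okr i bok v n hn hi1 hi6 hbok _ hv hb0
    show (if bok + 1 = n then _ else _) = _
    have hmod2 : ∀ a : Int, PySem.Int.mod a 2 = a % 2 :=
      fun a => PySem.Int.mod_eq_emod_of_pos (by norm_num)
    have hstep : ∀ w : Int, w = ileV bok →
        (if PySem.Int.mod (bok + 1) 2 = 1 then
           w + (if PySem.Int.mod okr 2 = 0 ∧ i = 1 then (-10 : Int) else -1)
         else w + 3) = ileV (bok + 1) := by
      intro w hw
      rw [hmod2, hmod2]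
      -- relate the condition (okr even ∧ i = 1) to bok+1 ≡ 7 [12]
      by_cases hc : okr % 2 = 0 ∧ i = 1
      · simp only [if_pos hc]
        have : (bok + 1) % 12 = 7 := by omega
        simp only [ileV] at hw ⊢
        omega
      · simp only [if_neg hc]
        have : (bok + 1) % 12 ≠ 7 := by omega
        simp only [ileV] at hw ⊢
        omega
    by_cases hend : bok + 1 = n
    · simp only [if_pos hend]
      rw [hstep _ hv, hend]
    · simp only [if_neg hend]
      have hfuel1 : 1 ≤ fuel := by omega
      by_cases h6 : i = 6
      · simp only [if_pos h6]
        exact ih (okr + 1) 1 (bok + 1) _ n (by omega) (by omega) (by omega)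
          (by omega) hfuel1 (hstep _ hv) (by omega)
      · simp only [if_neg h6]
        exact ih okr (i + 1) (bok + 1) _ n (by omega) (by omega) (by omega)
          (by omega) hfuel1 (hstep _ hv) (by omega)

-- ===== VERDICT (by name: the statement is the Claim_ definition above) =====
theorem ile_spec : Claim_equal_ile := by
  intro n _ hpre
  have hn1 : 1 ≤ n := hpre
  show ile n = ile_alt n
  have hfuel : (n.toNat : Int) = n := by omega
  have := ileGo_eq n.toNat 1 1 0 2 n (by omega) (by omega) (by omega) (by omega)
    (by omega) (by simp [ileV]) (by omega)
  rw [ile, this, ile_alt, ileV,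
    PySem.Int.floordiv_eq_ediv_of_pos (b := 2) (by norm_num),
    PySem.Int.floordiv_eq_ediv_of_pos (b := 12) (by norm_num)]
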